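-- pv_equiv track=rewrite | github.com/FelipeGinklings/Trabalho | test.py | classify_by_parenthesis_level
-- ===== SOURCE A (Python) =====
-- def classify_by_parenthesis_level(expr: str):
--     levels_dict: dict[int, list[str]] = {}
--     current_level = 0
--     current_expr: list[str] = []
--
--     for char in expr:
--         if char == "(":
--             if current_expr:
--                 levels_dict.setdefault(current_level, []).append("".join(current_expr))
--                 current_expr = []
--             current_level += 1
--         elif char == ")":
--             if current_expr:
--                 levels_dict.setdefault(current_level, []).append("".join(current_expr))
--                 current_expr = []
--             current_level -= 1
--         else:
--             current_expr.append(char)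
--
--     # Add any remaining expression at the final level
--     if current_expr:
--         levels_dict.setdefault(current_level, []).append("".join(current_expr))
--
--     return levels_dict
-- ===== SOURCE B (Python) =====
-- def _tokenize(expr):
--     """Split expr into non-paren segments and single-char '('/')' delimiter tokens."""
--     tokens = []
--     start = 0
--     for i, ch in enumerate(expr):
--         if ch in "()":
--             tokens.append(expr[start:i])
--             tokens.append(ch)
--             start = i + 1
--     tokens.append(expr[start:])
--     return tokens
--
--
-- def classify_by_parenthesis_level(expr: str):
--     levels_dict: dict[int, list[str]] = {}
--     level = 0
--     for token in _tokenize(expr):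
--         if token == "(":
--             level += 1
--         elif token == ")":
--             level -= 1
--         elif token:
--             levels_dict.setdefault(level, []).append(token)
--     return levels_dict
-- ===== Notes on version B (the rewrite author's own statement) =====
-- stated objective: alternative
-- what changed: B first tokenizes the string into non-paren slice segments and single-char paren delimiters (index/slice pass, no character buffer), then classifies the tokens in a second pass over the token list, instead of A's single char-by-char buffer-accumulate-and-flush pass.
import Mathlib
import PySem

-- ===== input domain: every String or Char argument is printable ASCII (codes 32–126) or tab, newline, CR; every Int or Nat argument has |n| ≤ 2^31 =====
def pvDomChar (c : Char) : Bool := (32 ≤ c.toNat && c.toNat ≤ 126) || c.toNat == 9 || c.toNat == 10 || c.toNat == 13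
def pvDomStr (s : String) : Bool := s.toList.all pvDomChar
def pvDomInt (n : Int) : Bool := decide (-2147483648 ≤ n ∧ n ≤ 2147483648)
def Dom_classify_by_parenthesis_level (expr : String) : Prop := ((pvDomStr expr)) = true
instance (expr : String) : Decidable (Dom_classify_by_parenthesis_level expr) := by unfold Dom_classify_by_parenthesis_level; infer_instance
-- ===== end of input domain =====

-- B replaces A's single char-by-char buffer-and-flush pass by a tokenize-then-classify
-- decomposition (split into segments and paren delimiters first, then one pass over tokens);
-- objective: alternative decomposition, same result.

-- ===== PORT A =====
-- 'levels_dict.setdefault(level, []).append(x)' mutates the list stored at 'level';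
-- ported exactly as Dict.modify level [] (· ++ [x]).
def pvFlushA (d : PySem.Dict Int (List String)) (level : Int) (cur : List Char) :
    PySem.Dict Int (List String) :=
  if cur.isEmpty then d else d.modify level [] (fun l => l ++ [String.ofList cur])

def pvAStep (st : PySem.Dict Int (List String) × Int × List Char) (c : Char) :
    PySem.Dict Int (List String) × Int × List Char :=
  if c = '(' then
    (pvFlushA st.1 st.2.1 st.2.2, st.2.1 + 1, [])
  else if c = ')' then
    (pvFlushA st.1 st.2.1 st.2.2, st.2.1 - 1, [])
  else (st.1, st.2.1, st.2.2 ++ [c])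

def classify_by_parenthesis_level (expr : String) : List (Int × List String) :=
  let st := expr.toList.foldl pvAStep (PySem.Dict.empty, 0, [])
  (pvFlushA st.1 st.2.1 st.2.2).items

-- ===== PORT B =====
def pvParen (c : Char) : Bool := c = '(' || c = ')'

def pvTokStep (s : List Char) (st : List String × Int) (p : Int × Char) : List String × Int :=
  if pvParen p.2 then
    (st.1 ++ [String.ofList (PySem.List.slice s (some st.2) (some p.1)), String.ofList [p.2]], p.1 + 1)
  else st

-- _tokenize: one pass over enumerate(expr), cutting slices at each paren
def pvTokenize (s : List Char) : List String :=
  let st := (PySem.List.enumerate s 0).foldl (pvTokStep s) ([], 0)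
  st.1 ++ [String.ofList (PySem.List.slice s (some st.2) none)]

def pvBStep (st : PySem.Dict Int (List String) × Int) (tok : String) :
    PySem.Dict Int (List String) × Int :=
  if tok = "(" then (st.1, st.2 + 1)
  else if tok = ")" then (st.1, st.2 - 1)
  else if tok ≠ "" then (st.1.modify st.2 [] (fun l => l ++ [tok]), st.2)
  else st

def classify_by_parenthesis_level_alt (expr : String) : List (Int × List String) :=
  let st := (pvTokenize expr.toList).foldl pvBStep (PySem.Dict.empty, 0)
  st.1.items

-- ===== PRECONDITION & SPEC =====
def Spec_classify_by_parenthesis_level (expr : String) (out : List (Int × List String)) : Prop := out = classify_by_parenthesis_level_alt expr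
instance (expr : String) (out : List (Int × List String)) : Decidable (Spec_classify_by_parenthesis_level expr out) := by unfold Spec_classify_by_parenthesis_level; infer_instance

-- ===== CLAIM (what is proved, stated in full; the proofs are below) =====
def Claim_equal_classify_by_parenthesis_level : Prop := ∀ (expr : String), Dom_classify_by_parenthesis_level expr → Spec_classify_by_parenthesis_level expr (classify_by_parenthesis_level expr)

-- ===== LEMMAS AND PROOFS =====

-- the tokenizer fold only appends tokens: initial tokens factor out
theorem pvTok_shift (s : List Char) (l : List (Int × Char)) :
    ∀ (tokens : List String) (start : Int),
      l.foldl (pvTokStep s) (tokens, start)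
        = (tokens ++ (l.foldl (pvTokStep s) ([], start)).1,
           (l.foldl (pvTokStep s) ([], start)).2) := by
  induction l with
  | nil => intro tokens start; simp
  | cons p l ih =>
    intro tokens start
    cases hp : pvParen p.2 with
    | true =>
      simp only [List.foldl_cons, pvTokStep, hp, if_pos, List.nil_append]
      rw [ih, ih [String.ofList (PySem.List.slice s (some start) (some p.1)),
                  String.ofList [p.2]]]
      simp
    | false =>
      simp only [List.foldl_cons, pvTokStep, hp, Bool.false_eq_true, if_neg,
        not_false_iff]
      exact ih tokens start

theorem pvOfList_ne_paren {cur : List Char}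
    (hfree : ∀ c ∈ cur, pvParen c = false) :
    String.ofList cur ≠ "(" ∧ String.ofList cur ≠ ")" := by
  constructor <;> intro h
  · have hc : cur = ['('] := by
      have := congrArg String.toList h; simpa using this
    have := hfree '(' (by simp [hc])
    simp [pvParen] at this
  · have hc : cur = [')'] := by
      have := congrArg String.toList h; simpa using this
    have := hfree ')' (by simp [hc])
    simp [pvParen] at this

-- pvBStep on a paren-free token = flush (empty token skipped, nonempty appended)
theorem pvBStep_seg (d : PySem.Dict Int (List String)) (level : Int) (cur : List Char)
    (hfree : ∀ c ∈ cur, pvParen c = false) :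
    pvBStep (d, level) (String.ofList cur) = (pvFlushA d level cur, level) := by
  obtain ⟨h1, h2⟩ := pvOfList_ne_paren hfree
  cases cur with
  | nil =>
    have he : (String.ofList [] : String) = "" := rfl
    simp [pvBStep, he, pvFlushA]
  | cons c cs =>
    have hne : String.ofList (c :: cs) ≠ "" := by
      intro h; have := congrArg String.toList h; simp at this
    simp [pvBStep, h1, h2, hne, pvFlushA]

theorem pvBStep_lparen (d : PySem.Dict Int (List String)) (level : Int) :
    pvBStep (d, level) (String.ofList ['(']) = (d, level + 1) := by
  simp [pvBStep]

theorem pvBStep_rparen (d : PySem.Dict Int (List String)) (level : Int) :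
    pvBStep (d, level) (String.ofList [')']) = (d, level - 1) := by
  have h1 : String.ofList [')'] ≠ "(" := by
    intro h; have := congrArg String.toList h; simp at this
  have h2 : String.ofList [')'] = ")" := rfl
  simp [pvBStep, h1, h2]

-- MAIN: the remaining tokenizer fold + token pass equals A's buffered pass,
-- for any suffix t = s.drop n with pending paren-free segment s[start:n]
theorem pvMain (s : List Char) :
    ∀ (t : List Char) (n start : Nat) (d : PySem.Dict Int (List String)) (level : Int),
      s.drop n = t → start ≤ n →
      (∀ c ∈ (s.drop start).take (n - start), pvParen c = false) →
      (let f := (PySem.List.enumerate t (n : Int)).foldl (pvTokStep s) ([], (start : Int))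
       ((f.1 ++ [String.ofList (PySem.List.slice s (some f.2) none)]).foldl pvBStep (d, level)).1)
      = (let a := t.foldl pvAStep (d, level, (s.drop start).take (n - start))
         pvFlushA a.1 a.2.1 a.2.2) := by
  intro t
  induction t with
  | nil =>
    intro n start d level hn hstart hfree
    have hlen : s.length ≤ n := by
      have := List.drop_eq_nil_iff.mp hn; omega
    have hcur : (s.drop start).take (n - start) = s.drop start := by
      apply List.take_of_length_le; simp; omega
    simp only [PySem.List.enumerate_nil, List.foldl_nil, List.nil_append,
      PySem.List.slice_from_natCast]
    rw [hcur] at hfree ⊢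
    simp only [List.foldl_cons, List.foldl_nil]
    rw [pvBStep_seg d level (s.drop start) hfree]
  | cons c t' ih =>
    intro n start d level hn hstart hfree
    have hdrop' : s.drop (n + 1) = t' := by
      rw [← List.drop_drop, hn]; rfl
    have hcur : PySem.List.slice s (some (start : Int)) (some (n : Int))
        = (s.drop start).take (n - start) := PySem.List.slice_natCast s start n
    have hcast : ((n : Int) + 1) = ((n + 1 : Nat) : Int) := by push_cast; ring
    simp only [PySem.List.enumerate_cons, List.foldl_cons]
    cases hp : pvParen c with
    | true =>
      -- delimiter: flush segment, bump level, fresh segment from n+1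
      simp only [pvTokStep, hp, if_pos]
      rw [pvTok_shift, hcast, hcur]
      set cur := (s.drop start).take (n - start) with hcurdef
      set d' := pvFlushA d level cur with hd'
      have hfree' : ∀ c' ∈ (s.drop (n+1)).take ((n+1) - (n+1)), pvParen c' = false := by
        simp
      have key : ∀ (lv : Int),
          ((((PySem.List.enumerate t' ((n+1 : Nat) : Int)).foldl (pvTokStep s)
                ([], ((n+1 : Nat) : Int))).1
             ++ [String.ofList (PySem.List.slice s
                  (some ((PySem.List.enumerate t' ((n+1 : Nat) : Int)).foldl (pvTokStep s)
                    ([], ((n+1 : Nat) : Int))).2) none)]).foldl pvBStep (d', lv)).1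
          = (let a := t'.foldl pvAStep (d', lv, (s.drop (n+1)).take ((n+1) - (n+1)))
             pvFlushA a.1 a.2.1 a.2.2) := fun lv =>
        ih (n+1) (n+1) d' lv hdrop' (le_refl _) hfree'
      have hseg : pvBStep (d, level) (String.ofList cur) = (d', level) :=
        pvBStep_seg d level cur hfree
      have hpc : c = '(' ∨ c = ')' := by
        rcases (by simpa [pvParen] using hp : c = '(' ∨ c = ')') with h | h
        · exact Or.inl h
        · exact Or.inr h
      rcases hpc with h | h <;> subst h
      · simp only [List.nil_append, List.cons_append, List.foldl_cons]
        rw [hseg, pvBStep_lparen]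
        have hk := key (level + 1)
        simp only [Nat.sub_self, List.take_zero] at hk ⊢
        rw [hk]
        simp [pvAStep, ← hd']
      · simp only [List.nil_append, List.cons_append, List.foldl_cons]
        rw [hseg, pvBStep_rparen]
        have hk := key (level - 1)
        simp only [Nat.sub_self, List.take_zero] at hk ⊢
        rw [hk]
        simp [pvAStep, ← hd']
    | false =>
      -- ordinary char: extend the pending segment
      simp only [pvTokStep, hp, Bool.false_eq_true, if_neg, not_false_iff]
      rw [hcast]
      have hgetc : (s.drop start).drop (n - start) = c :: t' := by
        rw [List.drop_drop]
        have h2 : start + (n - start) = n := by omega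
        rw [h2, hn]
      have hext : (s.drop start).take ((n+1) - start)
          = (s.drop start).take (n - start) ++ [c] := by
        have h1 : (n+1) - start = (n - start) + 1 := by omega
        rw [h1, List.take_add, hgetc]
        rfl
      have hfree' : ∀ c' ∈ (s.drop start).take ((n+1) - start), pvParen c' = false := by
        intro c' hc'
        rw [hext] at hc'
        rcases List.mem_append.mp hc' with hm | hm
        · exact hfree c' hm
        · simp at hm; subst hm; exact hp
      have hih := ih (n+1) start d level hdrop' (by omega) hfree'
      simp only at hih ⊢
      rw [hih, hext]
      have hc1 : c ≠ '(' := by intro h; subst h; simp [pvParen] at hp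
      have hc2 : c ≠ ')' := by intro h; subst h; simp [pvParen] at hp
      simp [pvAStep, hc1, hc2]

-- ===== VERDICT (by name: the statement is the Claim_ definition above) =====
theorem classify_by_parenthesis_level_spec : Claim_equal_classify_by_parenthesis_level := by
  intro expr _
  unfold Spec_classify_by_parenthesis_level
  unfold classify_by_parenthesis_level classify_by_parenthesis_level_alt pvTokenize
  have hm := pvMain expr.toList expr.toList 0 0 PySem.Dict.empty 0 (by simp) (le_refl _)
    (by simp)
  simp only [Nat.cast_zero, Nat.sub_self, List.take_zero, List.drop_zero] at hm
  simp only []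
  rw [← hm]
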